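-- pv_equiv track=rewrite | github.com/rararulab/rara-wiki | tools/build_pages.py | concept_groups
-- ===== SOURCE A (Python) =====
-- CONCEPT_SECTION_BY_SLUG = {
--     "three-layer-architecture": "Architecture",
--     "llm-wiki": "Architecture",
--     "rag-vs-llm-wiki": "Architecture",
--     "oh-my-codex": "Architecture",
--     "agent-harness": "Workflow",
--     "conversation-learning": "Workflow",
--     "github-pages-site": "Publishing",
-- }
--
-- def concept_groups(pages: list[dict[str, object]], nav_order: list[str]) -> dict[str, list[dict[str, object]]]:
--     by_slug = {page["slug"]: page for page in pages}
--     grouped: dict[str, list[dict[str, object]]] = {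
--         "Architecture": [],
--         "Workflow": [],
--         "Publishing": [],
--         "Other": [],
--     }
--     for slug in nav_order:
--         page = by_slug.get(slug)
--         if page is None or slug == "index":
--             continue
--         section = CONCEPT_SECTION_BY_SLUG.get(slug, "Other")
--         grouped.setdefault(section, []).append(page)
--     return {name: items for name, items in grouped.items() if items}
-- ===== SOURCE B (Python) =====
-- CONCEPT_SECTION_BY_SLUG = {
--     "three-layer-architecture": "Architecture",
--     "llm-wiki": "Architecture",
--     "rag-vs-llm-wiki": "Architecture",
--     "oh-my-codex": "Architecture",
--     "agent-harness": "Workflow",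
--     "conversation-learning": "Workflow",
--     "github-pages-site": "Publishing",
-- }
--
--
-- def concept_groups(pages: list[dict[str, object]], nav_order: list[str]) -> dict[str, list[dict[str, object]]]:
--     by_slug = {page["slug"]: page for page in pages}
--     result: dict[str, list[dict[str, object]]] = {}
--     for name in ("Architecture", "Workflow", "Publishing", "Other"):
--         items = [
--             by_slug[slug]
--             for slug in nav_order
--             if slug in by_slug and slug != "index"
--             and CONCEPT_SECTION_BY_SLUG.get(slug, "Other") == name
--         ]
--         if items:
--             result[name] = items
--     return result
-- ===== Notes on version B (the rewrite author's own statement) =====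
-- stated objective: alternative
-- what changed: Replaces the single dispatch loop that appends each nav slug into a pre-seeded four-key dict and then filters out empty sections, by iterating the fixed section order and building each section's list with its own comprehension over nav_order, adding only non-empty sections.
import Mathlib
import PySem

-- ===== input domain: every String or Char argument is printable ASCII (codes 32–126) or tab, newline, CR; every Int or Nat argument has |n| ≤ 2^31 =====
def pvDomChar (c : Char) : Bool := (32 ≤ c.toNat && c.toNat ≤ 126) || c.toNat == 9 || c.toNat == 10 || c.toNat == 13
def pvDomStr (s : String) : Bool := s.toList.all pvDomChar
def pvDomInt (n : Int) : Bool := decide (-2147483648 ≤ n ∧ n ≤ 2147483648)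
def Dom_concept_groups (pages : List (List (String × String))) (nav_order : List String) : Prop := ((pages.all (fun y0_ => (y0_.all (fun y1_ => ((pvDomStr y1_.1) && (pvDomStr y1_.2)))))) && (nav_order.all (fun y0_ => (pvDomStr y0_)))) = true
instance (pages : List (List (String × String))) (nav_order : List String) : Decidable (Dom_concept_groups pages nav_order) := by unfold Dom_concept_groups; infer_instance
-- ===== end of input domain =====

-- B restructures A's single dispatch loop into per-section scans of nav_order in fixed
-- section order (objective: alternative decomposition, same asymptotic cost).

-- ===== PORT A =====
-- CONCEPT_SECTION_BY_SLUG (module constant)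
def pvSectionBySlug : PySem.Dict String String := PySem.Dict.ofList
  [("three-layer-architecture", "Architecture"),
   ("llm-wiki", "Architecture"),
   ("rag-vs-llm-wiki", "Architecture"),
   ("oh-my-codex", "Architecture"),
   ("agent-harness", "Workflow"),
   ("conversation-learning", "Workflow"),
   ("github-pages-site", "Publishing")]

-- page["slug"]: first-match lookup in the page association list (the missing-key case,
-- Python's KeyError, is excluded by Pre_; the `getD ""` default is never reached there)
def pvSlugOf (page : List (String × String)) : String := (page.lookup "slug").getD ""

-- the body of A's `for slug in nav_order:` loop
def pvStep (by_slug : PySem.Dict String (List (String × String))) (g : PySem.Dict String (List (List (String × String)))) (slug : String) : PySem.Dict String (List (List (String × String))) :=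
  match by_slug.get? slug with                                   -- page = by_slug.get(slug)
  | none => g                                                    -- if page is None: continue
  | some page =>
    if slug == "index" then g                                    -- or slug == "index": continue
    else
      let sect := pvSectionBySlug.getD slug "Other"
      (g.setdefault sect []).modify sect [] (fun items => items ++ [page])  -- grouped.setdefault(section, []).append(page)

def concept_groups (pages : List (List (String × String))) (nav_order : List String) : List (String × List (List (String × String))) :=
  let by_slug : PySem.Dict String (List (String × String)) :=
    pages.foldl (fun d page => d.insert (pvSlugOf page) page) PySem.Dict.empty
  let grouped0 : PySem.Dict String (List (List (String × String))) :=
    PySem.Dict.ofList [("Architecture", []), ("Workflow", []), ("Publishing", []), ("Other", [])]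
  let grouped := nav_order.foldl (pvStep by_slug) grouped0
  grouped.items.filter (fun ni => !ni.2.isEmpty)                 -- {name: items for … if items}

-- ===== PORT B =====
-- one of B's per-section comprehensions over nav_order
def pvSel (by_slug : PySem.Dict String (List (String × String))) (name : String) (navs : List String) : List (List (String × String)) :=
  navs.filterMap (fun slug =>
    if by_slug.contains slug && slug != "index" && (pvSectionBySlug.getD slug "Other" == name)
    then by_slug.get? slug else none)

def concept_groups_alt (pages : List (List (String × String))) (nav_order : List String) : List (String × List (List (String × String))) :=
  let by_slug : PySem.Dict String (List (String × String)) :=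
    pages.foldl (fun d page => d.insert (pvSlugOf page) page) PySem.Dict.empty
  ["Architecture", "Workflow", "Publishing", "Other"].foldl (fun result name =>
    let items := pvSel by_slug name nav_order
    if items.isEmpty then result else result ++ [(name, items)]) []

-- ===== PRECONDITION & SPEC =====
-- Pre_ excludes pages without a "slug" key, on which Python A raises KeyError.
def Pre_concept_groups (pages : List (List (String × String))) (nav_order : List String) : Prop :=
  pages.all (fun page => page.any (fun kv => kv.1 == "slug")) = true
instance (pages : List (List (String × String))) (nav_order : List String) : Decidable (Pre_concept_groups pages nav_order) := by unfold Pre_concept_groups; infer_instance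

def pvWitness_concept_groups : (List (List (String × String))) × List String :=
  ([[("slug", "llm-wiki"), ("title", "LLM Wiki")], [("slug", "notes")]],
   ["llm-wiki", "index", "notes", "missing"])

def Spec_concept_groups (pages : List (List (String × String))) (nav_order : List String) (out : List (String × List (List (String × String)))) : Prop := out = concept_groups_alt pages nav_order
instance (pages : List (List (String × String))) (nav_order : List String) (out : List (String × List (List (String × String)))) : Decidable (Spec_concept_groups pages nav_order out) := by unfold Spec_concept_groups; infer_instance

-- ===== CLAIM (what is proved, stated in full; the proofs are below) =====
def Claim_equal_concept_groups : Prop := ∀ (pages : List (List (String × String))) (nav_order : List String), Dom_concept_groups pages nav_order → Pre_concept_groups pages nav_order → Spec_concept_groups pages nav_order (concept_groups pages nav_order)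

-- ===== LEMMAS AND PROOFS =====

-- the four section names, in A's insertion order = B's iteration order
def pvFour : List String := ["Architecture", "Workflow", "Publishing", "Other"]

theorem pvSection_mem_four (s : String) : pvSectionBySlug.getD s "Other" ∈ pvFour := by
  have hmk : pvSectionBySlug = PySem.Dict.mk
      [("three-layer-architecture", "Architecture"),
       ("llm-wiki", "Architecture"),
       ("rag-vs-llm-wiki", "Architecture"),
       ("oh-my-codex", "Architecture"),
       ("agent-harness", "Workflow"),
       ("conversation-learning", "Workflow"),
       ("github-pages-site", "Publishing")] := by decide
  rw [hmk, PySem.Dict.getD_eq_get?_getD]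
  simp only [PySem.Dict.get?_mk_cons]
  split_ifs <;> simp [pvFour, PySem.Dict.get?]

theorem pvStep_keys (by_slug : PySem.Dict String (List (String × String))) (g : PySem.Dict String (List (List (String × String)))) (slug : String) (hk : g.keys = pvFour) : (pvStep by_slug g slug).keys = pvFour := by
  unfold pvStep
  cases h : by_slug.get? slug with
  | none => exact hk
  | some page =>
    by_cases hi : slug == "index"
    · simp [hi, hk]
    · have hc : g.contains (pvSectionBySlug.getD slug "Other") = true := by
        rw [PySem.Dict.contains_iff_mem_keys, hk]; exact pvSection_mem_four slug
      simp only [hi, Bool.false_eq_true, if_false]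
      rw [PySem.Dict.setdefault_of_contains _ _ hc, PySem.Dict.keys_modify,
          PySem.Dict.keys_insert_of_contains _ _ hc, hk]

theorem pvStep_getD (by_slug : PySem.Dict String (List (String × String))) (g : PySem.Dict String (List (List (String × String)))) (slug name : String) (hk : g.keys = pvFour) : (pvStep by_slug g slug).getD name [] = g.getD name [] ++ pvSel by_slug name [slug] := by
  unfold pvStep pvSel
  cases h : by_slug.get? slug with
  | none =>
    have hc : by_slug.contains slug = false := by
      rw [PySem.Dict.contains_eq_isSome_get?, h]; rfl
    simp [hc]
  | some page =>
    have hc : by_slug.contains slug = true := by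
      rw [PySem.Dict.contains_eq_isSome_get?, h]; rfl
    by_cases hi : slug == "index"
    · have hs : slug = "index" := by simpa using hi
      simp [List.filterMap, hs]
    · have hne : slug ≠ "index" := by simpa using hi
      have hcg : g.contains (pvSectionBySlug.getD slug "Other") = true := by
        rw [PySem.Dict.contains_iff_mem_keys, hk]; exact pvSection_mem_four slug
      simp only [hi, Bool.false_eq_true, if_false]
      rw [PySem.Dict.setdefault_of_contains _ _ hcg, PySem.Dict.getD_modify]
      by_cases hn : name = pvSectionBySlug.getD slug "Other"
      · simp [List.filterMap, hn, hc, hne, h]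
      · simp [List.filterMap, hc, hne, Ne.symm hn, hn]

theorem pvSel_cons (by_slug : PySem.Dict String (List (String × String))) (name slug : String) (rest : List String) : pvSel by_slug name (slug :: rest) = pvSel by_slug name [slug] ++ pvSel by_slug name rest := by
  unfold pvSel
  simp only [List.filterMap_cons]
  cases hf : (if by_slug.contains slug && slug != "index" && (pvSectionBySlug.getD slug "Other" == name) then by_slug.get? slug else none) <;> simp

theorem pvLoop_keys (by_slug : PySem.Dict String (List (String × String))) (navs : List String) (g : PySem.Dict String (List (List (String × String)))) (hk : g.keys = pvFour) : (navs.foldl (pvStep by_slug) g).keys = pvFour := by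
  induction navs generalizing g with
  | nil => exact hk
  | cons s rest ih => exact ih _ (pvStep_keys _ _ _ hk)

theorem pvLoop_getD (by_slug : PySem.Dict String (List (String × String))) (navs : List String) (g : PySem.Dict String (List (List (String × String)))) (name : String) (hk : g.keys = pvFour) : (navs.foldl (pvStep by_slug) g).getD name [] = g.getD name [] ++ pvSel by_slug name navs := by
  induction navs generalizing g with
  | nil => simp [pvSel]
  | cons s rest ih =>
    rw [List.foldl_cons, ih _ (pvStep_keys _ _ _ hk), pvStep_getD _ _ _ _ hk,
        pvSel_cons, List.append_assoc]
    simp [pvSel, ← List.filterMap_append]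

theorem pvFoldB (itm : String → List (List (String × String))) (names : List String) (acc : List (String × List (List (String × String)))) : names.foldl (fun result name => if (itm name).isEmpty then result else result ++ [(name, itm name)]) acc = acc ++ (names.map (fun n => (n, itm n))).filter (fun p => !p.2.isEmpty) := by
  induction names generalizing acc with
  | nil => simp
  | cons n rest ih =>
    simp only [List.foldl_cons, List.map_cons, List.filter_cons]
    by_cases h : (itm n).isEmpty
    · rw [if_pos h, ih]; simp [h]
    · rw [if_neg (by simp [h]), ih]; simp [h]

theorem pvGrouped0_getD (k : String) : (PySem.Dict.ofList [("Architecture", ([] : List (List (String × String)))), ("Workflow", []), ("Publishing", []), ("Other", [])]).getD k [] = [] := by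
  have hmk : PySem.Dict.ofList [("Architecture", ([] : List (List (String × String)))), ("Workflow", []), ("Publishing", []), ("Other", [])] = PySem.Dict.mk [("Architecture", []), ("Workflow", []), ("Publishing", []), ("Other", [])] := by decide
  rw [hmk, PySem.Dict.getD_eq_get?_getD]
  simp only [PySem.Dict.get?_mk_cons]
  split_ifs <;> simp [PySem.Dict.get?]

-- ===== VERDICT (by name: the statement is the Claim_ definition above) =====
theorem concept_groups_spec : Claim_equal_concept_groups := by
  intro pages nav_order _ _
  unfold Spec_concept_groups concept_groups concept_groups_alt
  dsimp only
  rw [pvFoldB]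
  set by_slug := pages.foldl (fun d page => d.insert (pvSlugOf page) page) PySem.Dict.empty with hbs
  set grouped0 := PySem.Dict.ofList [("Architecture", ([] : List (List (String × String)))), ("Workflow", []), ("Publishing", []), ("Other", [])] with hg0
  have hk0 : grouped0.keys = pvFour := by rw [hg0]; decide
  have hkeys : (nav_order.foldl (pvStep by_slug) grouped0).keys = pvFour :=
    pvLoop_keys _ _ _ hk0
  have hnd : (nav_order.foldl (pvStep by_slug) grouped0).keys.Nodup := by
    rw [hkeys]; decide
  rw [PySem.Dict.items_eq_map_keys _ hnd ([] : List (List (String × String))), hkeys]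
  simp only [List.nil_append]
  congr 1
  apply List.map_congr_left
  intro k _
  rw [pvLoop_getD _ _ _ _ hk0, pvGrouped0_getD, List.nil_append]
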